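-- pv_equiv track=rewrite | github.com/mengjihua/Binary-Battle | other/replace手动与内置函数对比.py | manual_replace
-- ===== SOURCE A (Python) =====
-- def manual_replace(s, old, new):
--     if old == "":
--         return new.join(s[i:i+1] for i in range(len(s)+1))
--     result = []
--     start = 0
--     while True:
--         pos = s.find(old, start)
--         if pos == -1:
--             result.append(s[start:])
--             break
--         result.append(s[start:pos])
--         result.append(new)
--         start = pos + len(old)
--     return ''.join(result)
-- ===== SOURCE B (Python) =====
-- def manual_replace(s, old, new):
--     if old == "":
--         # insert new before every character and at the end (builtin str.replace semantics)
--         out = [new]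
--         for c in s:
--             out.append(c)
--             out.append(new)
--         return ''.join(out)
--     out = []
--     i, n, m = 0, len(s), len(old)
--     while i < n:
--         if s[i:i+m] == old:
--             out.append(new)
--             i += m
--         else:
--             out.append(s[i])
--             i += 1
--     return ''.join(out)
-- ===== Notes on version B (the rewrite author's own statement) =====
-- stated objective: alternative
-- what changed: replaces A's find-driven span slicing with a per-character scan that tests old as a prefix at each position, and fixes the empty-old branch to match builtin str.replace
-- intended difference: When old == '' and new != '', A returns the characters of s joined by new with only a trailing new (e.g. 'a-b-'), while B also puts new in front ('-a-b-'), which is what Python's builtin str.replace returns and what this manual-vs-builtin comparison module intends. — e.g. on manual_replace("ab", "", "-"): A returns "a-b-", B returns "-a-b-"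
import Mathlib
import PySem

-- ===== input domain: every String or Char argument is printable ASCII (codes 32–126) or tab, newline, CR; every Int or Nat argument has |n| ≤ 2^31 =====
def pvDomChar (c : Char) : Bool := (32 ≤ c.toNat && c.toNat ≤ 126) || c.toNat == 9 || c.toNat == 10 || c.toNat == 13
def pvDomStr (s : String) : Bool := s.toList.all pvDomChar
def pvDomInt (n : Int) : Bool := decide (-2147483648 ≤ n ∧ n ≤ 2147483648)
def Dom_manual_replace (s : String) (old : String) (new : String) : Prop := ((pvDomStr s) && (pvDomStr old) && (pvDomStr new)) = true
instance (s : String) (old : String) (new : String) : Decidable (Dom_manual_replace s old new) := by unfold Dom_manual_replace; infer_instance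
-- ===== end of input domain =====

-- B replaces A's find-driven span slicing by a per-character prefix-test scan, and its
-- empty-old branch returns builtin str.replace's value (A drops the leading copy of new there).


-- ===== PORT A =====
-- A's 'while True' loop; fuel s.length + 1 always suffices (start strictly grows each
-- iteration and stays ≤ s.length; proved in aGo_eq below), so the fuel-0 branch is unreachable.
def aGo (s old new : List Char) (fuel : Nat) (start : Nat) (result : List (List Char)) : List Char :=
  match fuel with
  | 0 => []
  | fuel + 1 =>
    let pos := PySem.Chars.findFrom s old (start : Int) none
    if pos = -1 then
      PySem.Chars.join [] (result ++ [PySem.List.slice s (some (start : Int)) none])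
    else
      aGo s old new fuel (pos.toNat + old.length)
        (result ++ [PySem.List.slice s (some (start : Int)) (some pos)] ++ [new])

def manual_replace (s : String) (old : String) (new : String) : String :=
  if old = "" then
    String.ofList (PySem.Chars.join new.toList ((PySem.List.pyRange 0 ((s.toList.length : Int) + 1)).map
      (fun i => PySem.List.slice s.toList (some i) (some (i + 1)))))
  else
    String.ofList (aGo s.toList old.toList new.toList (s.toList.length + 1) 0 [])

-- ===== PORT B =====
-- Source B's per-character scan: at each position test whether old is a prefix; on a hit
-- emit new and skip old.length characters (for the nonempty old this is called with,
-- t.drop (old.length - 1) = (c :: t).drop old.length), otherwise copy one character.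
def altGo (old new : List Char) : List Char → List Char
  | [] => []
  | c :: t =>
    if old.isPrefixOf (c :: t) then new ++ altGo old new (t.drop (old.length - 1))
    else c :: altGo old new t
  termination_by cs => cs.length
  decreasing_by
  · simp only [List.length_drop, List.length_cons]; omega
  · simp only [List.length_cons]; omega

-- Source B's empty-old branch builds [new, c0, new, c1, new, …] and joins it; that join is
-- new ++ flatMap (fun c => c :: new) s.
def manual_replace_alt (s : String) (old : String) (new : String) : String :=
  if old = "" then
    String.ofList (new.toList ++ s.toList.flatMap (fun c => c :: new.toList))
  else
    String.ofList (altGo old.toList new.toList s.toList)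

-- ===== PRECONDITION & SPEC =====
-- When old == '' and new != '', A returns the characters of s joined by new with only a
-- trailing new (e.g. 'a-b-'), while B also puts new in front ('-a-b-'), which is what
-- Python's builtin str.replace returns and what this manual-vs-builtin module intends.
def D_manual_replace (s : String) (old : String) (new : String) : Prop :=
  old = "" ∧ new ≠ ""
instance (s : String) (old : String) (new : String) : Decidable (D_manual_replace s old new) := by
  unfold D_manual_replace; infer_instance

def Spec_manual_replace (s : String) (old : String) (new : String) (out : String) : Prop :=
  ¬ D_manual_replace s old new → out = manual_replace_alt s old new
instance (s : String) (old : String) (new : String) (out : String) : Decidable (Spec_manual_replace s old new out) := by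
  unfold Spec_manual_replace; infer_instance

def pvDiffWitness_manual_replace : String × String × String := ("ab", "", "-")
def pvDiffWitnessOut_manual_replace : String × String := ("a-b-", "-a-b-")

-- ===== CLAIM (what is proved, stated in full; the proofs are below) =====
def Claim_unchanged_manual_replace : Prop := ∀ (s : String) (old : String) (new : String), Dom_manual_replace s old new → Spec_manual_replace s old new (manual_replace s old new)
def Claim_changed_manual_replace : Prop := Dom_manual_replace (pvDiffWitness_manual_replace.1) (pvDiffWitness_manual_replace.2.1) (pvDiffWitness_manual_replace.2.2) ∧ D_manual_replace (pvDiffWitness_manual_replace.1) (pvDiffWitness_manual_replace.2.1) (pvDiffWitness_manual_replace.2.2) ∧ manual_replace (pvDiffWitness_manual_replace.1) (pvDiffWitness_manual_replace.2.1) (pvDiffWitness_manual_replace.2.2) = pvDiffWitnessOut_manual_replace.1 ∧ manual_replace_alt (pvDiffWitness_manual_replace.1) (pvDiffWitness_manual_replace.2.1) (pvDiffWitness_manual_replace.2.2) = pvDiffWitnessOut_manual_replace.2 ∧ pvDiffWitnessOut_manual_replace.1 ≠ pvDiffWitnessOut_manual_replace.2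
def Claim_exact_manual_replace : Prop := ∀ (s : String) (old : String) (new : String), Dom_manual_replace s old new → D_manual_replace s old new → manual_replace s old new ≠ manual_replace_alt s old new

-- ===== LEMMAS AND PROOFS =====

theorem join_nil_flatten (parts : List (List Char)) :
    PySem.Chars.join [] parts = parts.flatten := by
  induction parts with
  | nil => simp [PySem.Chars.join_nil]
  | cons p rest ih =>
    cases rest with
    | nil => simp [PySem.Chars.join_singleton]
    | cons q rest' =>
      rw [PySem.Chars.join_cons_cons]
      simp [ih]

theorem take_one_drops (cs : List Char) :
    (List.range (cs.length + 1)).map (fun k => (cs.drop k).take 1)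
      = cs.map (fun c => [c]) ++ [[]] := by
  induction cs with
  | nil => simp
  | cons c t ih =>
    rw [List.length_cons, List.range_succ_eq_map, List.map_cons, List.map_map]
    simp only [List.drop_zero, List.take_succ_cons]
    have : ((fun k => (List.drop k (c :: t)).take 1) ∘ Nat.succ)
        = fun k => (List.drop k t).take 1 := by
      funext k; simp [List.drop_succ_cons]
    rw [this, ih]
    simp

-- A's empty-old pieces are the singleton characters of cs followed by the final empty slice.
theorem pieces_eq (cs : List Char) :
    (PySem.List.pyRange 0 ((cs.length : Int) + 1)).map
      (fun i => PySem.List.slice cs (some i) (some (i + 1)))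
      = cs.map (fun c => [c]) ++ [[]] := by
  have h : ((cs.length : Int) + 1) = ((cs.length + 1 : Nat) : Int) := by push_cast; ring
  rw [h, PySem.List.pyRange_zero_nat, List.map_map]
  rw [← take_one_drops cs]
  apply List.map_congr_left
  intro k _
  have h1 : ((k : Int) + 1) = ((k + 1 : Nat) : Int) := by push_cast; ring
  simp only [Function.comp_apply, h1, PySem.List.slice_natCast, Nat.add_sub_cancel_left]

-- join with separator new over those pieces is flatMap (fun c => c :: new).
theorem join_pieces (new : List Char) (cs : List Char) :
    PySem.Chars.join new (cs.map (fun c => [c]) ++ [[]])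
      = cs.flatMap (fun c => c :: new) := by
  induction cs with
  | nil => simp [PySem.Chars.join_singleton]
  | cons c t ih =>
    cases hq : t.map (fun c => [c]) ++ [[]] with
    | nil => simp at hq
    | cons q rest =>
      rw [List.map_cons, List.cons_append, hq, PySem.Chars.join_cons_cons, ← hq, ih]
      simp

theorem altGo_cons (old new : List Char) (c : Char) (t : List Char) :
    altGo old new (c :: t) =
      if old.isPrefixOf (c :: t) then new ++ altGo old new (t.drop (old.length - 1))
      else c :: altGo old new t := by
  rw [altGo]

theorem altGo_match (old new cs : List Char) (hne : old ≠ []) (h : old <+: cs) :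
    altGo old new cs = new ++ altGo old new (cs.drop old.length) := by
  cases cs with
  | nil =>
    cases old with
    | nil => exact absurd rfl hne
    | cons a b => exact absurd (List.prefix_nil.mp h) (by simp)
  | cons c t =>
    rw [altGo_cons, if_pos (List.isPrefixOf_iff_prefix.mpr h)]
    cases old with
    | nil => exact absurd rfl hne
    | cons a b => simp [List.drop_succ_cons]

theorem altGo_copy (old new : List Char) (k : Nat) :
    ∀ cs : List Char, (∀ j, j < k → ¬ old <+: cs.drop j) → k ≤ cs.length →
    altGo old new cs = cs.take k ++ altGo old new (cs.drop k) := by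
  induction k with
  | zero => intro cs _ _; simp
  | succ k ih =>
    intro cs h hk
    cases cs with
    | nil => simp at hk
    | cons c t =>
      rw [altGo_cons, if_neg]
      · rw [ih t (fun j hj => by simpa [List.drop_succ_cons] using h (j + 1) (by omega))
          (by simp at hk; omega)]
        simp
      · intro hp
        exact h 0 (by omega) (by simpa using List.isPrefixOf_iff_prefix.mp hp)

theorem altGo_nomatch (old new : List Char) (cs : List Char)
    (h : ∀ j, ¬ old <+: cs.drop j) : altGo old new cs = cs := by
  rw [altGo_copy old new cs.length cs (fun j _ => h j) (le_refl _)]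
  simp [altGo]

theorem prefix_drop_infix {old cs : List Char} {j : Nat} (h : old <+: cs.drop j) :
    old <:+: cs :=
  h.isInfix.trans (List.drop_suffix j cs).isInfix

-- the loop invariant: A's loop, run from any start with enough fuel, appends to the
-- already-collected pieces exactly what B's scan produces on the rest of the string.
theorem aGo_eq (s old new : List Char) (hne : old ≠ []) :
    ∀ (fuel start : Nat) (result : List (List Char)),
      start ≤ s.length → s.length - start < fuel →
      aGo s old new fuel start result = result.flatten ++ altGo old new (s.drop start) := by
  intro fuel
  induction fuel with
  | zero => intro start result _ h; omega
  | succ fuel ih =>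
    intro start result hstart hfuel
    simp only [aGo]
    by_cases hpos : PySem.Chars.findFrom s old (start : Int) none = -1
    · rw [if_pos hpos, join_nil_flatten]
      have hno : ¬ old <:+: s.drop start :=
        (PySem.Chars.findFrom_natCast_eq_neg_one_iff s old start hstart).mp hpos
      rw [altGo_nomatch old new (s.drop start) (fun j hp => hno (prefix_drop_infix hp))]
      rw [PySem.List.slice_from s (by positivity : (0:Int) ≤ (start : Int))]
      simp
    · rw [if_neg hpos]
      obtain ⟨hle, hpre, hmin⟩ := PySem.Chars.findFrom_natCast_spec s old start hstart hpos
      set pos := PySem.Chars.findFrom s old (start : Int) none with hposdef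
      have hpos0 : (0 : Int) ≤ pos := le_trans (by positivity) hle
      have hstartp : start ≤ pos.toNat := by omega
      have hm1 : 1 ≤ old.length := List.length_pos_iff.mpr hne
      have hlen : old.length ≤ s.length - pos.toNat := by
        have := hpre.length_le
        simpa [List.length_drop] using this
      have hpm : pos.toNat + old.length ≤ s.length := by omega
      rw [ih (pos.toNat + old.length) _ hpm (by omega)]
      have hcopy : altGo old new (s.drop start)
          = (s.drop start).take (pos.toNat - start)
            ++ altGo old new ((s.drop start).drop (pos.toNat - start)) := by
        apply altGo_copy
        · intro j hj hp
          rw [List.drop_drop] at hp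
          exact hmin (start + j) (by omega) (by omega) hp
        · simp only [List.length_drop]; omega
      have hdrop : (s.drop start).drop (pos.toNat - start) = s.drop pos.toNat := by
        rw [List.drop_drop]; congr 1; omega
      rw [hcopy, hdrop, altGo_match old new _ hne hpre, List.drop_drop]
      have hcast : pos = ((pos.toNat : Nat) : Int) := (Int.toNat_of_nonneg hpos0).symm
      rw [hcast, PySem.List.slice_natCast]
      simp only [List.flatten_append, List.flatten_cons, List.flatten_nil, List.append_nil,
        List.append_assoc]
      simp only [Int.toNat_natCast]

-- ===== VERDICT (by name: the statement is the Claim_ definition above) =====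
theorem manual_replace_spec : Claim_unchanged_manual_replace := by
  intro s old new _
  unfold Spec_manual_replace
  intro hnd
  by_cases ho : old = ""
  · have hnew : new = "" := by
      by_contra h
      exact hnd ⟨ho, h⟩
    subst ho; subst hnew
    rw [manual_replace, manual_replace_alt, if_pos rfl, if_pos rfl]
    congr 1
    rw [pieces_eq, join_pieces]
    simp
  · have hne : old.toList ≠ [] := by
      intro h
      apply ho
      cases old; simp_all
    rw [manual_replace, manual_replace_alt, if_neg ho, if_neg ho]
    congr 1
    rw [aGo_eq s.toList old.toList new.toList hne (s.toList.length + 1) 0 []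
      (by omega) (by omega)]
    simp

theorem manual_replace_changed : Claim_changed_manual_replace := by
  unfold Claim_changed_manual_replace; decide

theorem manual_replace_tight : Claim_exact_manual_replace := by
  intro s old new _ hD
  obtain ⟨ho, hn⟩ := hD
  subst ho
  rw [manual_replace, manual_replace_alt, if_pos rfl, if_pos rfl, pieces_eq, join_pieces]
  intro heq
  have h := congrArg String.toList heq
  simp only [String.toList_ofList] at h
  have hlen := congrArg List.length h
  simp only [List.length_append] at hlen
  have hz : new.toList.length = 0 := by omega
  have : new.toList = [] := List.eq_nil_of_length_eq_zero hz
  apply hn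
  cases new; simp_all
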